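-- pv_equiv track=rewrite | github.com/Semantic-Infrastructure-Lab/reveal | reveal/adapters/git/files.py | _filter_diff_to_element
-- ===== SOURCE A (Python) =====
-- from typing import Dict, Any, List, Optional, cast, TYPE_CHECKING
--
-- def _filter_diff_to_element(diff_text: str, element: str) -> str:
--     """Return only the hunks from diff_text whose context or body mention element."""
--     lines = diff_text.splitlines(keepends=True)
--     header_lines: List[str] = []
--     hunks: List[List[str]] = []
--     current: List[str] = []
--     in_header = True
--
--     for line in lines:
--         if line.startswith('@@'):
--             in_header = False
--             if current:
--                 hunks.append(current)
--             current = [line]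
--         elif in_header:
--             header_lines.append(line)
--         else:
--             current.append(line)
--
--     if current:
--         hunks.append(current)
--
--     matching = [h for h in hunks if any(element in l for l in h)]
--     if not matching:
--         return f"(no hunks in this diff mention '{element}')\n\n" + diff_text
--
--     return ''.join(header_lines) + ''.join(''.join(h) for h in matching)
-- ===== SOURCE B (Python) =====
-- def _filter_diff_to_element(diff_text: str, element: str) -> str:
--     """Return only the hunks from diff_text whose context or body mention element."""
--     lines = diff_text.splitlines(keepends=True)
--
--     def take_body(ls):
--         # lines up to (not including) the next hunk start
--         out = []
--         for l in ls:
--             if l.startswith('@@'):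
--                 break
--             out.append(l)
--         return out
--
--     def hunks(ls):
--         # ls is empty or begins with an '@@' line
--         if not ls:
--             return []
--         body = take_body(ls[1:])
--         return [[ls[0]] + body] + hunks(ls[1 + len(body):])
--
--     header = take_body(lines)
--     matching = [h for h in hunks(lines[len(header):]) if any(element in l for l in h)]
--     if not matching:
--         return f"(no hunks in this diff mention '{element}')\n\n" + diff_text
--     return ''.join(header) + ''.join(''.join(h) for h in matching)
-- ===== Notes on version B (the rewrite author's own statement) =====
-- stated objective: alternative
-- what changed: Replaces A's single pass with a mutable (header, hunks, current, in_header) state machine by a direct structural decomposition: take the header as the prefix of lines before the first '@@' line, then build hunks by a recursion that cuts one hunk ('@@' line plus its body) off the front at a time.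
import Mathlib
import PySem

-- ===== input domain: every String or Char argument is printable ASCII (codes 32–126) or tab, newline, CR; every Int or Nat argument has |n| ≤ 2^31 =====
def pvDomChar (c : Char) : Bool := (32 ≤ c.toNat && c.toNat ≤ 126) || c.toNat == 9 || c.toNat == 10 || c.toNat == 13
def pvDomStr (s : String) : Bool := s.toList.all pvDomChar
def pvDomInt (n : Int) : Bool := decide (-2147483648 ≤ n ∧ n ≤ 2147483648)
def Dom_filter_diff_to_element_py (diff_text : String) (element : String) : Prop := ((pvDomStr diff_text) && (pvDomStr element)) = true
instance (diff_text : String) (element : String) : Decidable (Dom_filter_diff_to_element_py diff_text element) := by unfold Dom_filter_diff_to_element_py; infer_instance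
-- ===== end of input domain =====

-- B replaces A's flag-and-accumulator state machine by a structural decomposition
-- (header = prefix before the first '@@' line; hunks cut off the front recursively);
-- same cost, alternative decomposition.


-- ===== shared helper: s.splitlines(keepends=True) =====
-- PySem has only keepends=False, so this is a hand port. It is exact on the stated
-- ASCII domain: the only line boundaries occurring there are '\n', '\r\n' and '\r'.
-- pvBreakLine cs = (first line including its line ending, remaining characters)
def pvBreakLine : List Char → List Char × List Char
  | [] => ([], [])
  | c :: tl =>
    if c = '\n' then ([c], tl)
    else if c = '\r' then
      match tl with
      | d :: tl' => if d = '\n' then (['\r', '\n'], tl') else (['\r'], d :: tl')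
      | [] => (['\r'], [])
    else
      let p := pvBreakLine tl
      (c :: p.1, p.2)

theorem pvBreakLine_snd_lt : ∀ (cs : List Char), cs ≠ [] → (pvBreakLine cs).2.length < cs.length := by
  intro cs
  induction cs with
  | nil => simp
  | cons c tl ih =>
    intro _
    simp only [pvBreakLine]
    split_ifs with h1 h2
    · simp
    · rcases tl with _ | ⟨d, tl'⟩
      · simp
      · by_cases hd : d = '\n' <;> simp [hd]
    · show (pvBreakLine tl).2.length < tl.length + 1
      rcases tl with _ | ⟨d, tl'⟩
      · simp [pvBreakLine]
      · have := ih (by simp)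
        omega

def pvSplitKeep (cs : List Char) : List (List Char) :=
  if h : cs = [] then []
  else (pvBreakLine cs).1 :: pvSplitKeep (pvBreakLine cs).2
termination_by cs.length
decreasing_by exact pvBreakLine_snd_lt cs h

-- line.startswith('@@')
def pvStartsAt (l : List Char) : Bool := PySem.Chars.startswith l ['@', '@']

-- the no-match message
def pvNoMatch (diff_text element : String) : String :=
  String.ofList ("(no hunks in this diff mention '".toList ++ element.toList ++
             "')\n\n".toList ++ diff_text.toList)

-- ===== PORT A =====
-- A's loop state: (header_lines, hunks, current, in_header)
def pvStepA (st : List (List Char) × List (List (List Char)) × List (List Char) × Bool)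
    (line : List Char) : List (List Char) × List (List (List Char)) × List (List Char) × Bool :=
  let (header, hunks, current, inHeader) := st
  if pvStartsAt line then
    (header, (if current ≠ [] then hunks ++ [current] else hunks), [line], false)
  else if inHeader then
    (header ++ [line], hunks, current, inHeader)
  else
    (header, hunks, current ++ [line], inHeader)

def filter_diff_to_element_py (diff_text : String) (element : String) : String :=
  let lines := pvSplitKeep diff_text.toList
  let st := lines.foldl pvStepA ([], [], [], true)
  let header := st.1
  let hunks0 := st.2.1
  let current := st.2.2.1
  let hunks := if current ≠ [] then hunks0 ++ [current] else hunks0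
  let matching := hunks.filter (fun h => h.any (fun l => PySem.Chars.isIn element.toList l))
  if matching = [] then
    pvNoMatch diff_text element
  else
    String.ofList (PySem.Chars.join [] header ++
               PySem.Chars.join [] (matching.map (PySem.Chars.join [])))

-- ===== PORT B =====
-- take_body: lines up to (not including) the next '@@' line
def pvTakeBody : List (List Char) → List (List Char)
  | [] => []
  | l :: tl => if pvStartsAt l then [] else l :: pvTakeBody tl

-- hunks(ls): ls is empty or begins with an '@@' line; cut one hunk off the front
-- (ls[1 + len(body):] is tl.drop body.length)
def pvHunksB : List (List Char) → List (List (List Char))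
  | [] => []
  | l :: tl => (l :: pvTakeBody tl) :: pvHunksB (tl.drop (pvTakeBody tl).length)
termination_by ls => ls.length
decreasing_by simp

def filter_diff_to_element_py_alt (diff_text : String) (element : String) : String :=
  let lines := pvSplitKeep diff_text.toList
  let header := pvTakeBody lines
  -- lines[len(header):] with an in-range nonnegative index is List.drop (exact)
  let matching := (pvHunksB (lines.drop header.length)).filter
      (fun h => h.any (fun l => PySem.Chars.isIn element.toList l))
  if matching = [] then
    pvNoMatch diff_text element
  else
    String.ofList (PySem.Chars.join [] header ++
               PySem.Chars.join [] (matching.map (PySem.Chars.join [])))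

-- ===== PRECONDITION & SPEC =====
def Spec_filter_diff_to_element_py (diff_text : String) (element : String) (out : String) : Prop := out = filter_diff_to_element_py_alt diff_text element
instance (diff_text : String) (element : String) (out : String) : Decidable (Spec_filter_diff_to_element_py diff_text element out) := by unfold Spec_filter_diff_to_element_py; infer_instance

-- ===== CLAIM (what is proved, stated in full; the proofs are below) =====
def Claim_equal_filter_diff_to_element_py : Prop := ∀ (diff_text : String) (element : String), Dom_filter_diff_to_element_py diff_text element → Spec_filter_diff_to_element_py diff_text element (filter_diff_to_element_py diff_text element)

-- ===== LEMMAS AND PROOFS =====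

theorem pvHunksB_nil : pvHunksB [] = [] := by rw [pvHunksB.eq_def]

theorem pvHunksB_cons (l : List Char) (tl : List (List Char)) :
    pvHunksB (l :: tl) = (l :: pvTakeBody tl) :: pvHunksB (tl.drop (pvTakeBody tl).length) := by
  rw [pvHunksB.eq_def]

-- finalize A's loop state: (header, hunks with the trailing `current` flushed)
def pvFinal (st : List (List Char) × List (List (List Char)) × List (List Char) × Bool) :
    List (List Char) × List (List (List Char)) :=
  (st.1, if st.2.2.1 ≠ [] then st.2.1 ++ [st.2.2.1] else st.2.1)

-- hunk phase of A's loop: once in_header is false and current is nonempty,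
-- the flushed hunks are `hs` plus the hunks B cuts off the front of `cur ++ ls`.
theorem pvFoldA_hunk (ls : List (List Char)) :
    ∀ (h : List (List Char)) (hs : List (List (List Char))) (cur : List (List Char)),
    cur ≠ [] →
    pvFinal (ls.foldl pvStepA (h, hs, cur, false)) =
      (h, hs ++ (cur ++ pvTakeBody ls) :: pvHunksB (ls.drop (pvTakeBody ls).length)) := by
  induction ls with
  | nil => intro h hs cur hc; simp [pvFinal, pvHunksB_nil, pvTakeBody, hc]
  | cons l tl ih =>
    intro h hs cur hc
    by_cases hl : pvStartsAt l = true
    · simp only [List.foldl_cons, pvStepA, hl, if_pos, hc, ne_eq, not_false_iff]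
      rw [ih h (hs ++ [cur]) [l] (by simp)]
      simp [pvTakeBody, hl, pvHunksB_cons]
    · simp only [List.foldl_cons, pvStepA, hl, Bool.false_eq_true, if_false]
      rw [ih h hs (cur ++ [l]) (by simp)]
      simp [pvTakeBody, hl, List.append_assoc]

-- header phase of A's loop: starting in the header state, A produces exactly
-- B's (prefix-before-'@@', recursively cut hunks) decomposition.
theorem pvFoldA_header (ls : List (List Char)) :
    ∀ (h : List (List Char)),
    pvFinal (ls.foldl pvStepA (h, [], [], true)) =
      (h ++ pvTakeBody ls, pvHunksB (ls.drop (pvTakeBody ls).length)) := by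
  induction ls with
  | nil => intro h; simp [pvFinal, pvHunksB_nil, pvTakeBody]
  | cons l tl ih =>
    intro h
    by_cases hl : pvStartsAt l = true
    · simp only [List.foldl_cons, pvStepA, hl, if_pos, ne_eq, not_true_eq_false, if_neg,
        not_false_iff]
      have h2 := pvFoldA_hunk tl h [] [l] (by simp)
      simp only [List.nil_append] at h2
      rw [h2]
      simp [pvTakeBody, hl, pvHunksB_cons]
    · simp only [List.foldl_cons, pvStepA, hl, Bool.false_eq_true, if_false, if_pos]
      rw [ih (h ++ [l])]
      simp [pvTakeBody, hl, List.append_assoc]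

-- ===== VERDICT (by name: the statement is the Claim_ definition above) =====
theorem filter_diff_to_element_py_spec : Claim_equal_filter_diff_to_element_py := by
  intro diff_text element _
  unfold Spec_filter_diff_to_element_py
  unfold filter_diff_to_element_py filter_diff_to_element_py_alt
  have hmain := pvFoldA_header (pvSplitKeep diff_text.toList) []
  simp only [List.nil_append] at hmain
  have h1 : (List.foldl pvStepA ([], [], [], true) (pvSplitKeep diff_text.toList)).1
      = pvTakeBody (pvSplitKeep diff_text.toList) := by
    have := congrArg Prod.fst hmain; simpa [pvFinal] using this
  have h2 : (if (List.foldl pvStepA ([], [], [], true) (pvSplitKeep diff_text.toList)).2.2.1 ≠ []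
      then (List.foldl pvStepA ([], [], [], true) (pvSplitKeep diff_text.toList)).2.1 ++
        [(List.foldl pvStepA ([], [], [], true) (pvSplitKeep diff_text.toList)).2.2.1]
      else (List.foldl pvStepA ([], [], [], true) (pvSplitKeep diff_text.toList)).2.1)
      = pvHunksB ((pvSplitKeep diff_text.toList).drop (pvTakeBody (pvSplitKeep diff_text.toList)).length) := by
    have := congrArg Prod.snd hmain; simpa [pvFinal] using this
  simp only [h1, h2]
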